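-- pv_equiv track=rewrite | github.com/gregsaunders/luminous_obsidian_vault | utils/combine_to_csv.py | extract_task_details
-- ===== SOURCE A (Python) =====
-- def extract_task_details(content_lines):
--     """
--     Given the content lines (after front matter),
--     attempt to extract the task and details sections.
--
--     We assume the body looks like:
--     **Task:** Some task title
--     (blank lines or other formatting)
--     **Details:**
--     - line 1
--     - line 2
--     etc.
--     """
--     task_line = ""
--     details_lines = []
--     in_details = False
--
--     for line in content_lines:
--         striped = line.strip()
--         if striped.startswith("**Task:**"):
--             # Extract everything after "**Task:**"
--             task_line = striped.replace("**Task:**", "").strip()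
--         elif striped.startswith("**Details:**"):
--             # Switch to details mode
--             in_details = True
--         else:
--             if in_details:
--                 # Accumulate detail lines
--                 details_lines.append(striped)
--
--     details = " ".join(details_lines)
--     return task_line, details
-- ===== SOURCE B (Python) =====
-- def extract_task_details(content_lines):
--     stripped = [line.strip() for line in content_lines]
--
--     # Pass 1: the last '**Task:**' line wins.
--     task_line = ""
--     for s in stripped:
--         if s.startswith("**Task:**"):
--             task_line = s.replace("**Task:**", "").strip()
--
--     # Pass 2: details are the stripped lines after the first '**Details:**'
--     # marker, excluding any marker lines.
--     idx = next((i for i, s in enumerate(stripped)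
--                 if s.startswith("**Details:**")), None)
--     if idx is None:
--         return task_line, ""
--     details = " ".join(s for s in stripped[idx + 1:]
--                        if not s.startswith("**Task:**")
--                        and not s.startswith("**Details:**"))
--     return task_line, details
-- ===== Notes on version B (the rewrite author's own statement) =====
-- stated objective: alternative
-- what changed: Replaces A's single stateful pass (task_line/details_lines/in_details accumulator) with two independent passes: a fold picking the last '**Task:**' line, and a find-first-'**Details:**'-index followed by a filter+join over the suffix.
import Mathlib
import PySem

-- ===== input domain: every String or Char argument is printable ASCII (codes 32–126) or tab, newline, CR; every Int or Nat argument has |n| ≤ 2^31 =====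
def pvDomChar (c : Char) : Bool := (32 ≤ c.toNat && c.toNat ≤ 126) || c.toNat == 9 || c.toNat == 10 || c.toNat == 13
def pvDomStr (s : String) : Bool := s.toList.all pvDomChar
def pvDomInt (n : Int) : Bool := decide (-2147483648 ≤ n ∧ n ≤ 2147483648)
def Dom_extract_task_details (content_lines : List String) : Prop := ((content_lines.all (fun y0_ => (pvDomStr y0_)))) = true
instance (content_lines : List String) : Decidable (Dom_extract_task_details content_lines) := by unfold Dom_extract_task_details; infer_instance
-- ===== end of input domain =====

-- B replaces A's single stateful pass (task/details/in_details accumulator) by two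
-- independent passes: last-'**Task:**' fold, then find-first-'**Details:**' + filter+join
-- of the suffix (objective: alternative decomposition, same cost).

-- ===== PORT A =====
-- loop body of A's single for-loop, on state (task_line, details_lines, in_details)
def extract_task_details_step (acc : String × List String × Bool) (line : String) :
    String × List String × Bool :=
  let striped := PySem.Str.strip line
  if PySem.Str.startswith striped "**Task:**" then
    (PySem.Str.strip (PySem.Str.replace striped "**Task:**" ""), acc.2.1, acc.2.2)
  else if PySem.Str.startswith striped "**Details:**" then
    (acc.1, acc.2.1, true)
  else if acc.2.2 then
    (acc.1, acc.2.1 ++ [striped], acc.2.2)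
  else acc

def extract_task_details (content_lines : List String) : String × String :=
  let st := content_lines.foldl extract_task_details_step ("", ([], false))
  (st.1, PySem.Str.join " " st.2.1)

-- ===== PORT B =====
def pvIsTask (s : String) : Bool := PySem.Str.startswith s "**Task:**"
def pvIsDetails (s : String) : Bool := PySem.Str.startswith s "**Details:**"

-- pass 1 of Source B: the last '**Task:**' line wins
def pvTaskOf (t : String) (ss : List String) : String :=
  ss.foldl (fun t s => if pvIsTask s then PySem.Str.strip (PySem.Str.replace s "**Task:**" "") else t) t

def extract_task_details_alt (content_lines : List String) : String × String :=
  let stripped := content_lines.map PySem.Str.strip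
  let task_line := pvTaskOf "" stripped
  match stripped.findIdx? pvIsDetails with
  | none => (task_line, "")
  | some idx =>
      -- stripped[idx+1:] with a nonnegative index is exactly List.drop (idx+1)
      (task_line,
       PySem.Str.join " " ((stripped.drop (idx + 1)).filter
         (fun s => !pvIsTask s && !pvIsDetails s)))

-- ===== PRECONDITION & SPEC =====
def Spec_extract_task_details (content_lines : List String) (out : String × String) : Prop := out = extract_task_details_alt content_lines
instance (content_lines : List String) (out : String × String) : Decidable (Spec_extract_task_details content_lines out) := by unfold Spec_extract_task_details; infer_instance

-- ===== CLAIM (what is proved, stated in full; the proofs are below) =====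
def Claim_equal_extract_task_details : Prop := ∀ (content_lines : List String), Dom_extract_task_details content_lines → Spec_extract_task_details content_lines (extract_task_details content_lines)

-- ===== LEMMAS AND PROOFS =====

-- A's step on an already-stripped line
def pvStepS (acc : String × List String × Bool) (s : String) : String × List String × Bool :=
  if pvIsTask s then
    (PySem.Str.strip (PySem.Str.replace s "**Task:**" ""), acc.2.1, acc.2.2)
  else if pvIsDetails s then
    (acc.1, acc.2.1, true)
  else if acc.2.2 then
    (acc.1, acc.2.1 ++ [s], acc.2.2)
  else acc

theorem pvNotBoth (s : String) : ¬ (pvIsTask s = true ∧ pvIsDetails s = true) := by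
  rintro ⟨ht, hd⟩
  rw [pvIsTask, PySem.Str.startswith_eq, PySem.Chars.startswith_iff] at ht
  rw [pvIsDetails, PySem.Str.startswith_eq, PySem.Chars.startswith_iff] at hd
  have : "**Task:**".toList <+: "**Details:**".toList :=
    List.prefix_of_prefix_length_le ht hd (by decide)
  exact absurd this (by decide)

def pvFilt (s : String) : Bool := !pvIsTask s && !pvIsDetails s

theorem pvTaskOf_cons (t : String) (s : String) (ss : List String) :
    pvTaskOf t (s :: ss) =
      pvTaskOf (if pvIsTask s then PySem.Str.strip (PySem.Str.replace s "**Task:**" "") else t) ss := rfl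

theorem pvFoldl_true (S : List String) : ∀ (t : String) (ds : List String),
    S.foldl pvStepS (t, ds, true) = (pvTaskOf t S, ds ++ S.filter pvFilt, true) := by
  induction S with
  | nil => intro t ds; simp [pvTaskOf]
  | cons s S ih =>
    intro t ds
    rw [List.foldl_cons, pvTaskOf_cons]
    by_cases ht : pvIsTask s = true
    · have hd : pvIsDetails s = false := by
        by_contra h
        exact pvNotBoth s ⟨ht, by revert h; cases pvIsDetails s <;> simp⟩
      simp [pvStepS, ht, hd, ih, pvFilt]
    · by_cases hd : pvIsDetails s = true
      · simp [pvStepS, ht, hd, ih, pvFilt]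
      · simp only [Bool.not_eq_true] at ht hd
        simp [pvStepS, ht, hd, ih, pvFilt]
  
theorem pvFoldl_false (S : List String) : ∀ (t : String) (ds : List String),
    S.foldl pvStepS (t, ds, false) =
      match S.findIdx? pvIsDetails with
      | none => (pvTaskOf t S, ds, false)
      | some i => (pvTaskOf t S, ds ++ (S.drop (i + 1)).filter pvFilt, true) := by
  induction S with
  | nil => intro t ds; simp [pvTaskOf]
  | cons s S ih =>
    intro t ds
    rw [List.foldl_cons, List.findIdx?_cons]
    by_cases hd : pvIsDetails s = true
    · have ht : pvIsTask s = false := by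
        by_contra h
        exact pvNotBoth s ⟨by revert h; cases pvIsTask s <;> simp, hd⟩
      rw [if_pos hd]
      have hs : pvStepS (t, ds, false) s = (t, ds, true) := by simp [pvStepS, ht, hd]
      rw [hs, pvFoldl_true, pvTaskOf_cons, ht]
      simp
    · rw [if_neg hd, pvTaskOf_cons]
      by_cases ht : pvIsTask s = true
      · rw [show pvStepS (t, ds, false) s =
              (PySem.Str.strip (PySem.Str.replace s "**Task:**" ""), ds, false) by
            simp [pvStepS, ht]]
        rw [ih, ht]
        cases h2 : S.findIdx? pvIsDetails <;> simp [List.drop_succ_cons]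
      · simp only [Bool.not_eq_true] at ht
        rw [show pvStepS (t, ds, false) s = (t, ds, false) by simp [pvStepS, ht, hd]]
        rw [ih, ht]
        cases h2 : S.findIdx? pvIsDetails <;> simp [List.drop_succ_cons]

-- ===== VERDICT (by name: the statement is the Claim_ definition above) =====
theorem extract_task_details_spec : Claim_equal_extract_task_details := by
  intro content_lines _
  unfold Spec_extract_task_details extract_task_details extract_task_details_alt
  have hmap : content_lines.foldl extract_task_details_step ("", ([], false)) =
      (content_lines.map PySem.Str.strip).foldl pvStepS ("", ([], false)) := by
    rw [List.foldl_map]; rfl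
  dsimp only
  rw [hmap, pvFoldl_false, List.findIdx?_map]
  cases h : content_lines.findIdx? (pvIsDetails ∘ PySem.Str.strip) with
  | none => rfl
  | some i => rfl
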